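-- pv_equiv track=rewrite | github.com/Valdegg/magicgamestation | cards_binders/card_autocomplete.py | filter_local_cards
-- ===== SOURCE A (Python) =====
-- from typing import Dict, List, Optional, Tuple
--
-- def get_unique_card_names(database: Dict) -> List[str]:
--     """
--     Extract unique card names from database.
--
--     Args:
--         database: Card database dictionary
--
--     Returns:
--         List of unique card names (case-preserved)
--     """
--     names = set()
--     for card_data in database.values():
--         if isinstance(card_data, dict) and 'name' in card_data:
--             names.add(card_data['name'])
--     return sorted(list(names))
--
-- def filter_local_cards(
--     search_term: str,
--     database: Dict,
--     max_results: int = 10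
-- ) -> List[str]:
--     """
--     Filter local database cards by prefix match.
--
--     Args:
--         search_term: Search prefix (case-insensitive)
--         database: Card database dictionary
--         max_results: Maximum number of results to return
--
--     Returns:
--         List of matching card names (up to max_results)
--     """
--     if not search_term or not database:
--         return []
--
--     search_lower = search_term.lower()
--     card_names = get_unique_card_names(database)
--
--     matches = [
--         name for name in card_names
--         if name.lower().startswith(search_lower)
--     ]
--
--     return matches[:max_results]
-- ===== SOURCE B (Python) =====
-- def filter_local_cards(search_term, database, max_results=10):
--     """Sort-then-adjacent-dedup variant: no set is used; after one conditional scan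
--     collecting matching names (with repetitions), the list is sorted and duplicates
--     are removed by comparing each element with its predecessor."""
--     if not search_term or not database:
--         return []
--     search_lower = search_term.lower()
--     names = [card_data['name'] for card_data in database.values()
--              if isinstance(card_data, dict) and 'name' in card_data
--              and card_data['name'].lower().startswith(search_lower)]
--     names.sort()
--     out = []
--     prev = None
--     for n in names:
--         if n != prev:
--             out.append(n)
--             prev = n
--     return out[:max_results]
-- ===== Notes on version B (the rewrite author's own statement) =====
-- stated objective: alternative
-- what changed: Replaces A's hash-set deduplication (build set of all unique names, sort, then prefix-filter) with a sort-then-adjacent-scan scheme: one conditional pass collects matching names with repetitions, the list is sorted, and duplicates are dropped by comparing each element with its predecessor; no set is used.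
import Mathlib
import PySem

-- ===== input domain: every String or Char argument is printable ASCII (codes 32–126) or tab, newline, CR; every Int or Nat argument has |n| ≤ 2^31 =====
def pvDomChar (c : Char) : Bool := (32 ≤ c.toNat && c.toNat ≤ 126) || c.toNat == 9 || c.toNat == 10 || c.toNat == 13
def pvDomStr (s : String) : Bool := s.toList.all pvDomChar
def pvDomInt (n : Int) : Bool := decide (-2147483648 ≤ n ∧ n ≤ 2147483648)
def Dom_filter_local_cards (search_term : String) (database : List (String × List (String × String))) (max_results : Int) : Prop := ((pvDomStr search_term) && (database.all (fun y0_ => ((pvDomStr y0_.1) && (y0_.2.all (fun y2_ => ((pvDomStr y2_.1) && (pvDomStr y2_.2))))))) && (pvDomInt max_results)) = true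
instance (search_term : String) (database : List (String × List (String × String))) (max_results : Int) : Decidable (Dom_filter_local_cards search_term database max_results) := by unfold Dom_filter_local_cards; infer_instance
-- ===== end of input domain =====

-- B replaces A's hash-set dedup (build set of all unique names, sort, prefix-filter) with a
-- sort-then-adjacent-scan: collect matching names with repetitions, sort, drop duplicates by
-- comparing each element with its predecessor (alternative algorithm, no set anywhere).


-- ===== PORT A =====
def get_unique_card_names (database : List (String × List (String × String))) : List String :=
  let names : PySem.Set String := database.foldl (fun s kv =>
    match kv.2.find? (fun p => p.1 == "name") with
    | some p => PySem.Set.add s p.2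
    | none => s) PySem.Set.empty
  PySem.List.sorted names (fun x => x) false

def filter_local_cards (search_term : String) (database : List (String × List (String × String))) (max_results : Int) : List String :=
  if search_term = "" ∨ database = [] then [] else
  let search_lower := PySem.Str.lower search_term
  let card_names := get_unique_card_names database
  let matched := card_names.filter (fun n => PySem.Str.startswith (PySem.Str.lower n) search_lower)
  PySem.List.slice matched none (some max_results)

-- ===== PORT B =====
/-- B's final `for n in names: if n != prev: out.append(n); prev = n` loop. -/
def pvDedupLoop : List String → List String → Option String → List String
  | [], out, _ => out
  | n :: rest, out, prev =>
    if some n ≠ prev then pvDedupLoop rest (out ++ [n]) (some n)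
    else pvDedupLoop rest out prev

def filter_local_cards_alt (search_term : String) (database : List (String × List (String × String))) (max_results : Int) : List String :=
  if search_term = "" ∨ database = [] then [] else
  let search_lower := PySem.Str.lower search_term
  let names := database.filterMap (fun kv =>
    match kv.2.find? (fun p => p.1 == "name") with
    | some p => if PySem.Str.startswith (PySem.Str.lower p.2) search_lower then some p.2 else none
    | none => none)
  let sortedNames := PySem.List.sorted names (fun x => x) false
  PySem.List.slice (pvDedupLoop sortedNames [] none) none (some max_results)

-- ===== PRECONDITION & SPEC =====
def Spec_filter_local_cards (search_term : String) (database : List (String × List (String × String))) (max_results : Int) (out : List String) : Prop := out = filter_local_cards_alt search_term database max_results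
instance (search_term : String) (database : List (String × List (String × String))) (max_results : Int) (out : List String) : Decidable (Spec_filter_local_cards search_term database max_results out) := by unfold Spec_filter_local_cards; infer_instance

-- ===== CLAIM (what is proved, stated in full; the proofs are below) =====
def Claim_equal_filter_local_cards : Prop := ∀ (search_term : String) (database : List (String × List (String × String))) (max_results : Int), Dom_filter_local_cards search_term database max_results → Spec_filter_local_cards search_term database max_results (filter_local_cards search_term database max_results)

-- ===== LEMMAS AND PROOFS =====

/-- The names A's fold extracts, in database order (with repetitions). -/
def pvNamesOf (database : List (String × List (String × String))) : List String :=
  database.filterMap (fun kv => (kv.2.find? (fun p => p.1 == "name")).map (·.2))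

theorem pvFoldA (database : List (String × List (String × String))) (acc : PySem.Set String) :
    database.foldl (fun s kv =>
      match kv.2.find? (fun p => p.1 == "name") with
      | some p => PySem.Set.add s p.2
      | none => s) acc = (pvNamesOf database).foldl PySem.Set.add acc := by
  induction database generalizing acc with
  | nil => rfl
  | cons kv rest ih =>
    simp only [List.foldl_cons, pvNamesOf, List.filterMap_cons]
    cases h : kv.2.find? (fun p => p.1 == "name") with
    | none => simpa [pvNamesOf] using ih _
    | some p => simpa [pvNamesOf] using ih _

theorem pvFoldA' (database : List (String × List (String × String))) :
    database.foldl (fun s kv =>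
      match kv.2.find? (fun p => p.1 == "name") with
      | some p => PySem.Set.add s p.2
      | none => s) PySem.Set.empty = PySem.Set.ofList (pvNamesOf database) := by
  rw [pvFoldA]; rfl

/-- B's comprehension = A's extracted names filtered by the prefix test. -/
theorem pvCompB (sl : String) (database : List (String × List (String × String))) :
    database.filterMap (fun kv =>
      match kv.2.find? (fun p => p.1 == "name") with
      | some p => if PySem.Str.startswith (PySem.Str.lower p.2) sl then some p.2 else none
      | none => none)
      = (pvNamesOf database).filter (fun n => PySem.Str.startswith (PySem.Str.lower n) sl) := by
  induction database with
  | nil => rfl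
  | cons kv rest ih =>
    simp only [pvNamesOf] at ih ⊢
    simp only [List.filterMap_cons]
    cases h : kv.2.find? (fun p => p.1 == "name") with
    | none => simpa using ih
    | some p =>
      simp only [Option.map_some, List.filter_cons]
      by_cases hq : PySem.Str.startswith (PySem.Str.lower p.2) sl = true
      · simp only [if_pos hq]
        exact congrArg _ ih
      · simp only [if_neg hq]
        exact ih

/-- Filtering the sorted unique names equals sorting the unique filtered names. -/
theorem pvSortedFilter (l : List String) (q : String → Bool) :
    (PySem.List.sorted (PySem.Set.ofList l) (fun x => x) false).filter q
      = PySem.List.sorted (PySem.Set.ofList (l.filter q)) (fun x => x) false := by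
  have hpw : ((PySem.List.sorted (PySem.Set.ofList l) (fun x => x) false).filter q).Pairwise
      (fun a b => a < b) :=
    List.Pairwise.sublist List.filter_sublist (PySem.List.sorted_ofList_pairwise_lt l)
  have hnd1 : ((PySem.List.sorted (PySem.Set.ofList l) (fun x => x) false).filter q).Nodup :=
    (((PySem.List.sorted_perm _ _ _).nodup_iff).2 (PySem.Set.nodup_ofList l)).filter q
  have hperm : ((PySem.List.sorted (PySem.Set.ofList l) (fun x => x) false).filter q).Perm
      (PySem.Set.ofList (l.filter q)) := by
    refine (List.perm_ext_iff_of_nodup hnd1 (PySem.Set.nodup_ofList _)).2 ?_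
    intro a
    simp [List.mem_filter, PySem.List.mem_sorted, PySem.Set.mem_ofList]
  exact (PySem.List.sorted_eq_of_perm_of_pairwise_lt _ _ _ hperm hpw).symm

/-- Tail-recursive loop = the simple structural dedup. -/
def pvD : List String → Option String → List String
  | [], _ => []
  | n :: rest, prev => if some n ≠ prev then n :: pvD rest (some n) else pvD rest prev

theorem pvDedupLoop_eq (l : List String) (out : List String) (prev : Option String) :
    pvDedupLoop l out prev = out ++ pvD l prev := by
  induction l generalizing out prev with
  | nil => simp [pvDedupLoop, pvD]
  | cons n rest ih =>
    by_cases h : some n ≠ prev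
    · simp [pvDedupLoop, pvD, h, ih]
    · simp [pvDedupLoop, pvD, h, ih]

theorem pvD_spec (l : List String) (p : String)
    (hs : l.Pairwise (· ≤ ·)) (hlb : ∀ x ∈ l, p ≤ x) :
    (pvD l (some p)).Pairwise (· < ·) ∧ (∀ a, a ∈ pvD l (some p) ↔ a ∈ l ∧ a ≠ p) := by
  induction l generalizing p with
  | nil => simp [pvD]
  | cons n rest ih =>
    rcases List.pairwise_cons.1 hs with ⟨hn, hrest⟩
    by_cases hnp : n = p
    · subst hnp
      have he : pvD (n :: rest) (some n) = pvD rest (some n) := by simp [pvD]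
      have := ih n hrest hn
      rw [he]
      refine ⟨this.1, fun a => ?_⟩
      rw [this.2 a]
      constructor
      · rintro ⟨ha, hne⟩; exact ⟨List.mem_cons_of_mem _ ha, hne⟩
      · rintro ⟨ha, hne⟩
        rcases List.mem_cons.1 ha with rfl | ha
        · exact absurd rfl hne
        · exact ⟨ha, hne⟩
    · have hpn : p < n := lt_of_le_of_ne (hlb n (List.mem_cons_self)) (Ne.symm hnp)
      have he : pvD (n :: rest) (some p) = n :: pvD rest (some n) := by simp [pvD, hnp]
      have := ih n hrest hn
      rw [he]
      constructor
      · refine List.pairwise_cons.2 ⟨fun b hb => ?_, this.1⟩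
        rcases (this.2 b).1 hb with ⟨hbr, hbn⟩
        exact lt_of_le_of_ne (hn b hbr) (Ne.symm hbn)
      · intro a
        rw [List.mem_cons, this.2 a]
        constructor
        · rintro (rfl | ⟨ha, hne⟩)
          · exact ⟨List.mem_cons_self, Ne.symm (ne_of_lt hpn)⟩
          · refine ⟨List.mem_cons_of_mem _ ha, ?_⟩
            exact Ne.symm (ne_of_lt (lt_of_lt_of_le hpn (hn a ha)))
        · rintro ⟨ha, hne⟩
          rcases List.mem_cons.1 ha with rfl | ha
          · exact Or.inl rfl
          · by_cases han : a = n
            · exact Or.inl han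
            · exact Or.inr ⟨ha, han⟩

theorem pvD_none (l : List String) (hs : l.Pairwise (· ≤ ·)) :
    (pvD l none).Pairwise (· < ·) ∧ (∀ a, a ∈ pvD l none ↔ a ∈ l) := by
  cases l with
  | nil => simp [pvD]
  | cons n rest =>
    rcases List.pairwise_cons.1 hs with ⟨hn, hrest⟩
    have := pvD_spec rest n hrest hn
    have he : pvD (n :: rest) none = n :: pvD rest (some n) := by simp [pvD]
    rw [he]
    constructor
    · refine List.pairwise_cons.2 ⟨fun b hb => ?_, this.1⟩
      rcases (this.2 b).1 hb with ⟨hbr, hbn⟩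
      exact lt_of_le_of_ne (hn b hbr) (Ne.symm hbn)
    · intro a
      rw [List.mem_cons, this.2 a, List.mem_cons]
      constructor
      · rintro (rfl | ⟨ha, _⟩)
        · exact Or.inl rfl
        · exact Or.inr ha
      · rintro (rfl | ha)
        · exact Or.inl rfl
        · by_cases han : a = n
          · exact Or.inl han
          · exact Or.inr ⟨ha, han⟩

/-- Adjacent-dedup of the sorted list (with repetitions) = Python's sorted(set(...)). -/
theorem pvDedup_sorted (m : List String) :
    pvDedupLoop (PySem.List.sorted m (fun x => x) false) [] none
      = PySem.List.sorted (PySem.Set.ofList m) (fun x => x) false := by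
  rw [pvDedupLoop_eq, List.nil_append]
  have hs : (PySem.List.sorted m (fun x => x) false).Pairwise (· ≤ ·) := by
    simpa using PySem.List.sorted_pairwise m (fun x => x)
  obtain ⟨hpw, hmem⟩ := pvD_none _ hs
  have hnd : (pvD (PySem.List.sorted m (fun x => x) false) none).Nodup :=
    hpw.imp (fun h => ne_of_lt h)
  have hperm : (pvD (PySem.List.sorted m (fun x => x) false) none).Perm
      (PySem.Set.ofList m) := by
    refine (List.perm_ext_iff_of_nodup hnd (PySem.Set.nodup_ofList _)).2 ?_
    intro a
    rw [hmem a]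
    simp [PySem.List.mem_sorted, PySem.Set.mem_ofList]
  exact (PySem.List.sorted_eq_of_perm_of_pairwise_lt _ _ _ hperm hpw).symm

-- ===== VERDICT (by name: the statement is the Claim_ definition above) =====
theorem filter_local_cards_spec : Claim_equal_filter_local_cards := by
  intro st db mr _
  unfold Spec_filter_local_cards filter_local_cards filter_local_cards_alt get_unique_card_names
  by_cases hg : st = "" ∨ db = []
  · simp [hg]
  · simp only [hg, if_false]
    rw [pvFoldA', pvSortedFilter, pvCompB (PySem.Str.lower st), pvDedup_sorted]
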